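-- pv_equiv track=rewrite | github.com/David-Tong/leetcode-in-python | 2320-count number of ways to place houses/main.py | countHousePlacements
-- ===== SOURCE A (Python) =====
-- def countHousePlacements(n):
--     """
--     :type n: int
--     :rtype: int
--     """
--     # dp init
--     # dp[x][state] - the number of ways to place houses with the xth plots taken by state s
--     #       state  - the combination of plots taken
--     #                00 none of plots is taken, 01 the down plot is taken
--     #                10 the upper plot is taken, 11 both plots are taken
--     L = 2 ** 2
--     MODULO = 10 ** 9 + 7
--     dp = [[0] * L for x in range(n)]
--     for state in range(L):
--         dp[0][state] = 1
--
--     # dp transfer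
--     # dp[x][state] - sum(dp[x - 1][other state])
--     for x in range(1, n):
--         for state in range(L):
--             for pre_state in range(L):
--                 if state & pre_state == 0:
--                     dp[x][state] = (dp[x][state] + dp[x - 1][pre_state]) % MODULO
--     ans = sum(dp[n - 1]) % MODULO
--     return ans
--
-- n = 10000
-- ===== SOURCE B (Python) =====
-- def countHousePlacements(n):
--     """
--     :type n: int
--     :rtype: int
--     """
--     # One row of n plots has F(n+2) independent-set arrangements (Fibonacci);
--     # the two rows are independent, so the answer is F(n+2)^2 mod 1e9+7.
--     # Fast-doubling Fibonacci: O(log n) instead of A's O(n) table.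
--     MODULO = 10 ** 9 + 7
--
--     def fib(k):
--         # returns (F(k), F(k+1)) modulo MODULO
--         if k == 0:
--             return (0, 1)
--         a, b = fib(k >> 1)
--         c = a * (2 * b - a) % MODULO
--         d = (a * a + b * b) % MODULO
--         if k & 1:
--             return (d, (c + d) % MODULO)
--         return (c, d)
--
--     f = fib(n + 2)[0]
--     return f * f % MODULO
-- ===== Notes on version B (the rewrite author's own statement) =====
-- stated objective: faster
-- what changed: Replaces the O(n) 4-state DP table with a closed form: the answer is F(n+2)^2 mod 1e9+7, computed by fast-doubling Fibonacci in O(log n).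
import Mathlib
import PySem

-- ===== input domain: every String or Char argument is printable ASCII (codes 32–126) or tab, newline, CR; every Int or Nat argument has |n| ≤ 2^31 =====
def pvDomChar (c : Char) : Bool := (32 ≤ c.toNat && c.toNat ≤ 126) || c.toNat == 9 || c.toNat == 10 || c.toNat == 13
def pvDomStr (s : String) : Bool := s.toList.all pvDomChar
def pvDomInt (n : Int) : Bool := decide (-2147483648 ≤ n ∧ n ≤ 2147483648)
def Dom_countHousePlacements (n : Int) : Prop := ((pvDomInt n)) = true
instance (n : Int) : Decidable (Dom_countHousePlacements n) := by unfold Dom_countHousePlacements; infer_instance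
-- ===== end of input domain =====

-- B replaces A's O(n) 4-state DP table with the closed form F(n+2)^2 mod 1e9+7 computed by
-- fast-doubling Fibonacci; equivalence is proved for all n ≥ 1 (A raises IndexError otherwise).

-- ===== PORT A =====
-- dp[x][s] = v  (both indices are nonnegative and in range wherever A executes this)
def pySet2 (dp : List (List Int)) (x s : Int) (v : Int) : List (List Int) :=
  PySem.List.pySetD dp x (PySem.List.pySetD (PySem.List.pyGetD dp x []) s v)

-- the body of A's outer loop: 'for state in range(L): for pre_state in range(L): …' (L = 4)
def aInner (dp : List (List Int)) (x : Int) : List (List Int) :=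
  (PySem.List.pyRange 0 4 1).foldl (fun dp state =>
    (PySem.List.pyRange 0 4 1).foldl (fun dp pre_state =>
      if PySem.Int.band state pre_state = 0 then
        pySet2 dp x state
          (PySem.Int.mod
            (PySem.List.pyGetD (PySem.List.pyGetD dp x []) state 0
              + PySem.List.pyGetD (PySem.List.pyGetD dp (x - 1) []) pre_state 0)
            1000000007)
      else dp) dp) dp

def countHousePlacements (n : Int) : Int :=
  -- L = 2 ** 2 = 4, MODULO = 10 ** 9 + 7; dp = [[0] * L for x in range(n)]
  let dp : List (List Int) := (PySem.List.pyRange 0 n 1).map (fun _ => List.replicate 4 (0 : Int))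
  -- for state in range(L): dp[0][state] = 1
  let dp := (PySem.List.pyRange 0 4 1).foldl (fun dp state => pySet2 dp 0 state 1) dp
  -- for x in range(1, n): …
  let dp := (PySem.List.pyRange 1 n 1).foldl aInner dp
  -- ans = sum(dp[n - 1]) % MODULO
  PySem.Int.mod ((PySem.List.pyGetD dp (n - 1) []).foldl (· + ·) 0) 1000000007

-- ===== PORT B =====
-- fib(k) of Source B: (F(k), F(k+1)) mod 1e9+7 by fast doubling; k >> 1 is k >>> 1, k & 1 is k &&& 1.
-- The fuel argument (= k at the call) only makes the recursion structural; it is never exhausted.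
def fibFDAux : Nat → Nat → Int × Int
  | _, 0 => (0, 1)
  | 0, _ + 1 => (0, 1)  -- unreachable: fibFD calls with fuel = k ≥ the recursion depth
  | fuel + 1, k + 1 =>
    let p := fibFDAux fuel ((k + 1) >>> 1)
    let a := p.1
    let b := p.2
    let c := PySem.Int.mod (a * (2 * b - a)) 1000000007
    let d := PySem.Int.mod (a * a + b * b) 1000000007
    if (k + 1) &&& 1 = 1 then (d, PySem.Int.mod (c + d) 1000000007) else (c, d)

def fibFD (k : Nat) : Int × Int := fibFDAux k k

def countHousePlacements_alt (n : Int) : Int :=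
  -- f = fib(n + 2)[0]; (n + 2).toNat is exact for n ≥ -2, and Pre_ requires 1 ≤ n
  let f := (fibFD (n + 2).toNat).1
  PySem.Int.mod (f * f) 1000000007

-- ===== PRECONDITION & SPEC =====
-- A builds dp with n rows and immediately writes dp[0]: for n ≤ 0 it raises IndexError
def Pre_countHousePlacements (n : Int) : Prop := 1 ≤ n
instance (n : Int) : Decidable (Pre_countHousePlacements n) := by unfold Pre_countHousePlacements; infer_instance
def pvWitness_countHousePlacements : Int := 3

def Spec_countHousePlacements (n : Int) (out : Int) : Prop := out = countHousePlacements_alt n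
instance (n : Int) (out : Int) : Decidable (Spec_countHousePlacements n out) := by unfold Spec_countHousePlacements; infer_instance

-- ===== CLAIM (what is proved, stated in full; the proofs are below) =====
def Claim_equal_countHousePlacements : Prop := ∀ (n : Int), Dom_countHousePlacements n → Pre_countHousePlacements n → Spec_countHousePlacements n (countHousePlacements n)

-- ===== LEMMAS AND PROOFS =====

def pvM : Int := 1000000007

lemma pmod (a : Int) : PySem.Int.mod a 1000000007 = a % pvM :=
  PySem.Int.mod_eq_emod_of_pos (by norm_num [pvM])

lemma self_mod (x : Int) : (x % pvM) ≡ x [ZMOD pvM] :=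
  Int.emod_emod_of_dvd x dvd_rfl

-- the two per-row Fibonacci counts (row of length k: ends-free / ends-occupied style split)
def fE (k : Nat) : Int := (Nat.fib (k + 2) : Int)
def fO (k : Nat) : Int := (Nat.fib (k + 1) : Int)

-- B: fast doubling computes Fibonacci mod 1e9+7
lemma fibFDAux_eq (fuel : Nat) : ∀ k : Nat, k ≤ fuel →
    fibFDAux fuel k = ((Nat.fib k : Int) % pvM, (Nat.fib (k + 1) : Int) % pvM) := by
  induction fuel with
  | zero =>
    intro k hk
    interval_cases k
    simp [fibFDAux, pvM]
  | succ fuel ih =>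
    intro k hk
    match k with
    | 0 => simp [fibFDAux, pvM]
    | k + 1 =>
      have hm : (k + 1) >>> 1 = (k + 1) / 2 := by
        simp [Nat.shiftRight_eq_div_pow]
      have hrec := ih ((k + 1) >>> 1) (by rw [hm]; omega)
      rw [fibFDAux, hrec, hm]
      set m := (k + 1) / 2 with hmdef
      set X : Int := (Nat.fib m : Int) with hX
      set Y : Int := (Nat.fib (m + 1) : Int) with hY
      have hfib2m : (Nat.fib (2 * m) : Int) = X * (2 * Y - X) := by
        have hle : Nat.fib m ≤ 2 * Nat.fib (m + 1) :=
          le_trans (Nat.fib_le_fib_succ) (by omega)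
        rw [Nat.fib_two_mul]
        push_cast [hle]
        ring
      have hfib2m1 : (Nat.fib (2 * m + 1) : Int) = Y * Y + X * X := by
        rw [Nat.fib_two_mul_add_one]
        push_cast
        ring
      have hc : (X % pvM * (2 * (Y % pvM) - X % pvM)) % pvM = (Nat.fib (2 * m) : Int) % pvM := by
        rw [hfib2m]
        exact (self_mod X).mul (((self_mod Y).mul_left 2).sub (self_mod X))
      have hd : (X % pvM * (X % pvM) + Y % pvM * (Y % pvM)) % pvM
          = (Nat.fib (2 * m + 1) : Int) % pvM := by
        rw [hfib2m1, show Y * Y + X * X = X * X + Y * Y by ring]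
        exact ((self_mod X).mul (self_mod X)).add ((self_mod Y).mul (self_mod Y))
      have hand : (k + 1) &&& 1 = (k + 1) % 2 := Nat.and_one_is_mod _
      have hdm := Nat.div_add_mod (k + 1) 2
      simp only [pmod, hand]
      rcases Nat.mod_two_eq_zero_or_one (k + 1) with hpar | hpar
      · -- even branch: k + 1 = 2 * m
        have hk1 : 2 * m = k + 1 := by omega
        rw [hpar, if_neg (by omega)]
        rw [Prod.mk.injEq]
        constructor
        · rw [hc, hk1]
        · rw [hd, hk1]
      · -- odd branch: k + 1 = 2 * m + 1
        have hk1 : 2 * m + 1 = k + 1 := by omega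
        rw [hpar, if_pos rfl]
        rw [Prod.mk.injEq]
        constructor
        · rw [hd, hk1]
        · -- (c + d) % M = fib (2m + 2) % M
          have hsum : (Nat.fib (k + 1 + 1) : Int) = X * (2 * Y - X) + (Y * Y + X * X) := by
            have h2 : k + 1 + 1 = 2 * m + 1 + 1 := by omega
            rw [h2, Nat.fib_add_two, Nat.cast_add, hfib2m, hfib2m1]
          rw [hsum]
          have h1 : (X % pvM * (2 * (Y % pvM) - X % pvM)) % pvM
                ≡ X * (2 * Y - X) [ZMOD pvM] :=
            (self_mod _).trans ((self_mod X).mul (((self_mod Y).mul_left 2).sub (self_mod X)))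
          have h2 : (X % pvM * (X % pvM) + Y % pvM * (Y % pvM)) % pvM
                ≡ Y * Y + X * X [ZMOD pvM] := by
            refine (self_mod _).trans ?_
            rw [show Y * Y + X * X = X * X + Y * Y by ring]
            exact ((self_mod X).mul (self_mod X)).add ((self_mod Y).mul (self_mod Y))
          exact h1.add h2

lemma fibFD_eq (k : Nat) : fibFD k = ((Nat.fib k : Int) % pvM, (Nat.fib (k + 1) : Int) % pvM) :=
  fibFDAux_eq k k le_rfl

-- the value written into dp[x] by one outer iteration, from dp[x-1] = [a, b, b, c]
def triStep : Int × Int × Int → Int × Int × Int := fun t =>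
  (((((0 + t.1) % pvM + t.2.1) % pvM + t.2.1) % pvM + t.2.2) % pvM,
   ((0 + t.1) % pvM + t.2.1) % pvM,
   (0 + t.1) % pvM)

def tri : Nat → Int × Int × Int
  | 0 => (1, 1, 1)
  | k + 1 => triStep (tri k)

def rowOf (t : Int × Int × Int) : List Int := [t.1, t.2.1, t.2.1, t.2.2]

-- A's dp after the outer loop has processed x = 1 .. k
def dpModel (n k : Nat) : List (List Int) :=
  (List.range n).map (fun i => if i ≤ k then rowOf (tri i) else [0, 0, 0, 0])

lemma set_map_range {α : Type} (n i : Nat) (f : Nat → α) (v : α) (h : i < n) :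
    ((List.range n).map f).set i v = (List.range n).map (fun j => if j = i then v else f j) := by
  apply List.ext_getElem (by simp)
  intro j h1 h2
  simp only [List.getElem_set, List.getElem_map, List.getElem_range]
  by_cases hij : i = j
  · rw [if_pos hij, if_pos hij.symm]
  · rw [if_neg hij, if_neg (fun hh => hij hh.symm)]

lemma getD_set_self {α : Type} (l : List α) (x : Nat) (hlt : x < l.length) (r : α) (d : α) :
    (l.set x r).getD x d = r := by
  rw [List.getD_eq_getElem?_getD, List.getElem?_set_self (by simpa using hlt)]
  rfl

lemma getD_set_ne {α : Type} (l : List α) (x j : Nat) (h : j ≠ x) (r : α) (d : α) :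
    (l.set x r).getD j d = l.getD j d := by
  rw [List.getD_eq_getElem?_getD, List.getElem?_set_ne (fun hh => h hh.symm),
      ← List.getD_eq_getElem?_getD]

lemma pyRange4 : PySem.List.pyRange 0 4 1 = [0, 1, 2, 3] := by decide

-- pyGetD / pySetD on a concrete 4-row with literal index
lemma getD_lit0 (p q r s d : Int) : PySem.List.pyGetD [p, q, r, s] 0 d = p := rfl
lemma getD_lit1 (p q r s d : Int) : PySem.List.pyGetD [p, q, r, s] 1 d = q := rfl
lemma getD_lit2 (p q r s d : Int) : PySem.List.pyGetD [p, q, r, s] 2 d = r := rfl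
lemma getD_lit3 (p q r s d : Int) : PySem.List.pyGetD [p, q, r, s] 3 d = s := rfl
lemma setD_lit0 (p q r s v : Int) : PySem.List.pySetD [p, q, r, s] 0 v = [v, q, r, s] := rfl
lemma setD_lit1 (p q r s v : Int) : PySem.List.pySetD [p, q, r, s] 1 v = [p, v, r, s] := rfl
lemma setD_lit2 (p q r s v : Int) : PySem.List.pySetD [p, q, r, s] 2 v = [p, q, v, s] := rfl
lemma setD_lit3 (p q r s v : Int) : PySem.List.pySetD [p, q, r, s] 3 v = [p, q, r, v] := rfl

lemma inner0 (dps : List (List Int)) (x : Nat) (hx : x < dps.length) (hx0 : 1 ≤ x)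
    (p q r t a b c : Int)
    (hrow : PySem.List.pyGetD dps (x : Int) [] = [p, q, r, t])
    (hprev : PySem.List.pyGetD dps ((x : Int) - 1) [] = [a, b, b, c]) :
    List.foldl (fun dp pre_state =>
      if PySem.Int.band 0 pre_state = 0 then
        pySet2 dp (x : Int) 0
          (PySem.Int.mod
            (PySem.List.pyGetD (PySem.List.pyGetD dp (x : Int) []) 0 0
              + PySem.List.pyGetD (PySem.List.pyGetD dp ((x : Int) - 1) []) pre_state 0)
            1000000007)
      else dp) dps [0, 1, 2, 3]
    = dps.set x [((((p + a) % pvM + b) % pvM + b) % pvM + c) % pvM, q, r, t] := by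
  have hget : ∀ (rr : List (Int)), PySem.List.pyGetD (dps.set x rr) (x : Int) [] = rr := by
    intro rr
    rw [PySem.List.pyGetD_natCast, getD_set_self _ _ hx]
  have hgetp : ∀ (rr : List (Int)), PySem.List.pyGetD (dps.set x rr) ((x : Int) - 1) [] = [a, b, b, c] := by
    intro rr
    have h1 : (x : Int) - 1 = ((x - 1 : Nat) : Int) := by omega
    rw [h1, PySem.List.pyGetD_natCast, getD_set_ne _ _ _ (by omega), ← PySem.List.pyGetD_natCast, ← h1, hprev]
  rw [List.foldl_cons]
  rw [if_pos (by decide : PySem.Int.band 0 0 = 0)]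
  rw [show pySet2 (dps) (x : Int) 0
        (PySem.Int.mod (PySem.List.pyGetD (PySem.List.pyGetD (dps) (x : Int) []) 0 0
          + PySem.List.pyGetD (PySem.List.pyGetD (dps) ((x : Int) - 1) []) 0 0) 1000000007)
      = dps.set x [(p + a) % pvM, q, r, t] by
    simp only [pySet2, hrow, hprev, getD_lit0, getD_lit0,
      setD_lit0, PySem.List.pySetD_natCast, pmod]]
  rw [List.foldl_cons]
  rw [if_pos (by decide : PySem.Int.band 0 1 = 0)]
  rw [show pySet2 (dps.set x ([(p + a) % pvM, q, r, t])) (x : Int) 0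
        (PySem.Int.mod (PySem.List.pyGetD (PySem.List.pyGetD (dps.set x ([(p + a) % pvM, q, r, t])) (x : Int) []) 0 0
          + PySem.List.pyGetD (PySem.List.pyGetD (dps.set x ([(p + a) % pvM, q, r, t])) ((x : Int) - 1) []) 1 0) 1000000007)
      = dps.set x [((p + a) % pvM + b) % pvM, q, r, t] by
    simp only [pySet2, hget [(p + a) % pvM, q, r, t], hgetp [(p + a) % pvM, q, r, t], getD_lit0, getD_lit1,
      setD_lit0, PySem.List.pySetD_natCast, pmod, List.set_set]]
  rw [List.foldl_cons]
  rw [if_pos (by decide : PySem.Int.band 0 2 = 0)]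
  rw [show pySet2 (dps.set x ([((p + a) % pvM + b) % pvM, q, r, t])) (x : Int) 0
        (PySem.Int.mod (PySem.List.pyGetD (PySem.List.pyGetD (dps.set x ([((p + a) % pvM + b) % pvM, q, r, t])) (x : Int) []) 0 0
          + PySem.List.pyGetD (PySem.List.pyGetD (dps.set x ([((p + a) % pvM + b) % pvM, q, r, t])) ((x : Int) - 1) []) 2 0) 1000000007)
      = dps.set x [(((p + a) % pvM + b) % pvM + b) % pvM, q, r, t] by
    simp only [pySet2, hget [((p + a) % pvM + b) % pvM, q, r, t], hgetp [((p + a) % pvM + b) % pvM, q, r, t], getD_lit0, getD_lit2,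
      setD_lit0, PySem.List.pySetD_natCast, pmod, List.set_set]]
  rw [List.foldl_cons]
  rw [if_pos (by decide : PySem.Int.band 0 3 = 0)]
  rw [show pySet2 (dps.set x ([(((p + a) % pvM + b) % pvM + b) % pvM, q, r, t])) (x : Int) 0
        (PySem.Int.mod (PySem.List.pyGetD (PySem.List.pyGetD (dps.set x ([(((p + a) % pvM + b) % pvM + b) % pvM, q, r, t])) (x : Int) []) 0 0
          + PySem.List.pyGetD (PySem.List.pyGetD (dps.set x ([(((p + a) % pvM + b) % pvM + b) % pvM, q, r, t])) ((x : Int) - 1) []) 3 0) 1000000007)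
      = dps.set x [((((p + a) % pvM + b) % pvM + b) % pvM + c) % pvM, q, r, t] by
    simp only [pySet2, hget [(((p + a) % pvM + b) % pvM + b) % pvM, q, r, t], hgetp [(((p + a) % pvM + b) % pvM + b) % pvM, q, r, t], getD_lit0, getD_lit3,
      setD_lit0, PySem.List.pySetD_natCast, pmod, List.set_set]]
  rw [List.foldl_nil]

lemma inner1 (dps : List (List Int)) (x : Nat) (hx : x < dps.length) (hx0 : 1 ≤ x)
    (p q r t a b c : Int)
    (hrow : PySem.List.pyGetD dps (x : Int) [] = [p, q, r, t])
    (hprev : PySem.List.pyGetD dps ((x : Int) - 1) [] = [a, b, b, c]) :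
    List.foldl (fun dp pre_state =>
      if PySem.Int.band 1 pre_state = 0 then
        pySet2 dp (x : Int) 1
          (PySem.Int.mod
            (PySem.List.pyGetD (PySem.List.pyGetD dp (x : Int) []) 1 0
              + PySem.List.pyGetD (PySem.List.pyGetD dp ((x : Int) - 1) []) pre_state 0)
            1000000007)
      else dp) dps [0, 1, 2, 3]
    = dps.set x [p, ((q + a) % pvM + b) % pvM, r, t] := by
  have hget : ∀ (rr : List (Int)), PySem.List.pyGetD (dps.set x rr) (x : Int) [] = rr := by
    intro rr
    rw [PySem.List.pyGetD_natCast, getD_set_self _ _ hx]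
  have hgetp : ∀ (rr : List (Int)), PySem.List.pyGetD (dps.set x rr) ((x : Int) - 1) [] = [a, b, b, c] := by
    intro rr
    have h1 : (x : Int) - 1 = ((x - 1 : Nat) : Int) := by omega
    rw [h1, PySem.List.pyGetD_natCast, getD_set_ne _ _ _ (by omega), ← PySem.List.pyGetD_natCast, ← h1, hprev]
  rw [List.foldl_cons]
  rw [if_pos (by decide : PySem.Int.band 1 0 = 0)]
  rw [show pySet2 (dps) (x : Int) 1
        (PySem.Int.mod (PySem.List.pyGetD (PySem.List.pyGetD (dps) (x : Int) []) 1 0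
          + PySem.List.pyGetD (PySem.List.pyGetD (dps) ((x : Int) - 1) []) 0 0) 1000000007)
      = dps.set x [p, (q + a) % pvM, r, t] by
    simp only [pySet2, hrow, hprev, getD_lit1, getD_lit0,
      setD_lit1, PySem.List.pySetD_natCast, pmod]]
  rw [List.foldl_cons]
  rw [if_neg (by decide : ¬ PySem.Int.band 1 1 = 0)]
  rw [List.foldl_cons]
  rw [if_pos (by decide : PySem.Int.band 1 2 = 0)]
  rw [show pySet2 (dps.set x ([p, (q + a) % pvM, r, t])) (x : Int) 1
        (PySem.Int.mod (PySem.List.pyGetD (PySem.List.pyGetD (dps.set x ([p, (q + a) % pvM, r, t])) (x : Int) []) 1 0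
          + PySem.List.pyGetD (PySem.List.pyGetD (dps.set x ([p, (q + a) % pvM, r, t])) ((x : Int) - 1) []) 2 0) 1000000007)
      = dps.set x [p, ((q + a) % pvM + b) % pvM, r, t] by
    simp only [pySet2, hget [p, (q + a) % pvM, r, t], hgetp [p, (q + a) % pvM, r, t], getD_lit1, getD_lit2,
      setD_lit1, PySem.List.pySetD_natCast, pmod, List.set_set]]
  rw [List.foldl_cons]
  rw [if_neg (by decide : ¬ PySem.Int.band 1 3 = 0)]
  rw [List.foldl_nil]

lemma inner2 (dps : List (List Int)) (x : Nat) (hx : x < dps.length) (hx0 : 1 ≤ x)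
    (p q r t a b c : Int)
    (hrow : PySem.List.pyGetD dps (x : Int) [] = [p, q, r, t])
    (hprev : PySem.List.pyGetD dps ((x : Int) - 1) [] = [a, b, b, c]) :
    List.foldl (fun dp pre_state =>
      if PySem.Int.band 2 pre_state = 0 then
        pySet2 dp (x : Int) 2
          (PySem.Int.mod
            (PySem.List.pyGetD (PySem.List.pyGetD dp (x : Int) []) 2 0
              + PySem.List.pyGetD (PySem.List.pyGetD dp ((x : Int) - 1) []) pre_state 0)
            1000000007)
      else dp) dps [0, 1, 2, 3]
    = dps.set x [p, q, ((r + a) % pvM + b) % pvM, t] := by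
  have hget : ∀ (rr : List (Int)), PySem.List.pyGetD (dps.set x rr) (x : Int) [] = rr := by
    intro rr
    rw [PySem.List.pyGetD_natCast, getD_set_self _ _ hx]
  have hgetp : ∀ (rr : List (Int)), PySem.List.pyGetD (dps.set x rr) ((x : Int) - 1) [] = [a, b, b, c] := by
    intro rr
    have h1 : (x : Int) - 1 = ((x - 1 : Nat) : Int) := by omega
    rw [h1, PySem.List.pyGetD_natCast, getD_set_ne _ _ _ (by omega), ← PySem.List.pyGetD_natCast, ← h1, hprev]
  rw [List.foldl_cons]
  rw [if_pos (by decide : PySem.Int.band 2 0 = 0)]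
  rw [show pySet2 (dps) (x : Int) 2
        (PySem.Int.mod (PySem.List.pyGetD (PySem.List.pyGetD (dps) (x : Int) []) 2 0
          + PySem.List.pyGetD (PySem.List.pyGetD (dps) ((x : Int) - 1) []) 0 0) 1000000007)
      = dps.set x [p, q, (r + a) % pvM, t] by
    simp only [pySet2, hrow, hprev, getD_lit2, getD_lit0,
      setD_lit2, PySem.List.pySetD_natCast, pmod]]
  rw [List.foldl_cons]
  rw [if_pos (by decide : PySem.Int.band 2 1 = 0)]
  rw [show pySet2 (dps.set x ([p, q, (r + a) % pvM, t])) (x : Int) 2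
        (PySem.Int.mod (PySem.List.pyGetD (PySem.List.pyGetD (dps.set x ([p, q, (r + a) % pvM, t])) (x : Int) []) 2 0
          + PySem.List.pyGetD (PySem.List.pyGetD (dps.set x ([p, q, (r + a) % pvM, t])) ((x : Int) - 1) []) 1 0) 1000000007)
      = dps.set x [p, q, ((r + a) % pvM + b) % pvM, t] by
    simp only [pySet2, hget [p, q, (r + a) % pvM, t], hgetp [p, q, (r + a) % pvM, t], getD_lit2, getD_lit1,
      setD_lit2, PySem.List.pySetD_natCast, pmod, List.set_set]]
  rw [List.foldl_cons]
  rw [if_neg (by decide : ¬ PySem.Int.band 2 2 = 0)]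
  rw [List.foldl_cons]
  rw [if_neg (by decide : ¬ PySem.Int.band 2 3 = 0)]
  rw [List.foldl_nil]

lemma inner3 (dps : List (List Int)) (x : Nat) (hx : x < dps.length) (hx0 : 1 ≤ x)
    (p q r t a b c : Int)
    (hrow : PySem.List.pyGetD dps (x : Int) [] = [p, q, r, t])
    (hprev : PySem.List.pyGetD dps ((x : Int) - 1) [] = [a, b, b, c]) :
    List.foldl (fun dp pre_state =>
      if PySem.Int.band 3 pre_state = 0 then
        pySet2 dp (x : Int) 3
          (PySem.Int.mod
            (PySem.List.pyGetD (PySem.List.pyGetD dp (x : Int) []) 3 0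
              + PySem.List.pyGetD (PySem.List.pyGetD dp ((x : Int) - 1) []) pre_state 0)
            1000000007)
      else dp) dps [0, 1, 2, 3]
    = dps.set x [p, q, r, (t + a) % pvM] := by
  have hget : ∀ (rr : List (Int)), PySem.List.pyGetD (dps.set x rr) (x : Int) [] = rr := by
    intro rr
    rw [PySem.List.pyGetD_natCast, getD_set_self _ _ hx]
  have hgetp : ∀ (rr : List (Int)), PySem.List.pyGetD (dps.set x rr) ((x : Int) - 1) [] = [a, b, b, c] := by
    intro rr
    have h1 : (x : Int) - 1 = ((x - 1 : Nat) : Int) := by omega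
    rw [h1, PySem.List.pyGetD_natCast, getD_set_ne _ _ _ (by omega), ← PySem.List.pyGetD_natCast, ← h1, hprev]
  rw [List.foldl_cons]
  rw [if_pos (by decide : PySem.Int.band 3 0 = 0)]
  rw [show pySet2 (dps) (x : Int) 3
        (PySem.Int.mod (PySem.List.pyGetD (PySem.List.pyGetD (dps) (x : Int) []) 3 0
          + PySem.List.pyGetD (PySem.List.pyGetD (dps) ((x : Int) - 1) []) 0 0) 1000000007)
      = dps.set x [p, q, r, (t + a) % pvM] by
    simp only [pySet2, hrow, hprev, getD_lit3, getD_lit0,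
      setD_lit3, PySem.List.pySetD_natCast, pmod]]
  rw [List.foldl_cons]
  rw [if_neg (by decide : ¬ PySem.Int.band 3 1 = 0)]
  rw [List.foldl_cons]
  rw [if_neg (by decide : ¬ PySem.Int.band 3 2 = 0)]
  rw [List.foldl_cons]
  rw [if_neg (by decide : ¬ PySem.Int.band 3 3 = 0)]
  rw [List.foldl_nil]

lemma aInner_spec (dp : List (List Int)) (x : Nat) (hx : x < dp.length) (hx0 : 1 ≤ x)
    (a b c : Int)
    (hrow : PySem.List.pyGetD dp (x : Int) [] = [0, 0, 0, 0])
    (hprev : PySem.List.pyGetD dp ((x : Int) - 1) [] = [a, b, b, c]) :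
    aInner dp (x : Int) = dp.set x (rowOf (triStep (a, b, c))) := by
  have hget : ∀ (rr : List (Int)), PySem.List.pyGetD (dp.set x rr) (x : Int) [] = rr := by
    intro rr
    rw [PySem.List.pyGetD_natCast, getD_set_self _ _ hx]
  have hgetp : ∀ (rr : List (Int)), PySem.List.pyGetD (dp.set x rr) ((x : Int) - 1) [] = [a, b, b, c] := by
    intro rr
    have h1 : (x : Int) - 1 = ((x - 1 : Nat) : Int) := by omega
    rw [h1, PySem.List.pyGetD_natCast, getD_set_ne _ _ _ (by omega), ← PySem.List.pyGetD_natCast, ← h1, hprev]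
  unfold aInner
  rw [pyRange4]
  rw [List.foldl_cons]
  rw [inner0 (dp) x hx hx0 _ _ _ _ a b c hrow hprev]
  rw [List.foldl_cons]
  rw [inner1 (dp.set x ([(((((0) + a) % pvM + b) % pvM + b) % pvM + c) % pvM, (0), (0), (0)])) x (by simpa using hx) hx0 _ _ _ _ a b c (hget [(((((0) + a) % pvM + b) % pvM + b) % pvM + c) % pvM, (0), (0), (0)]) (hgetp [(((((0) + a) % pvM + b) % pvM + b) % pvM + c) % pvM, (0), (0), (0)])]
  rw [List.set_set]
  rw [List.foldl_cons]
  rw [inner2 (dp.set x ([((((((0) + a) % pvM + b) % pvM + b) % pvM + c) % pvM), ((((0)) + a) % pvM + b) % pvM, ((0)), ((0))])) x (by simpa using hx) hx0 _ _ _ _ a b c (hget [((((((0) + a) % pvM + b) % pvM + b) % pvM + c) % pvM), ((((0)) + a) % pvM + b) % pvM, ((0)), ((0))]) (hgetp [((((((0) + a) % pvM + b) % pvM + b) % pvM + c) % pvM), ((((0)) + a) % pvM + b) % pvM, ((0)), ((0))])]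
  rw [List.set_set]
  rw [List.foldl_cons]
  rw [inner3 (dp.set x ([(((((((0) + a) % pvM + b) % pvM + b) % pvM + c) % pvM)), (((((0)) + a) % pvM + b) % pvM), (((((0))) + a) % pvM + b) % pvM, (((0)))])) x (by simpa using hx) hx0 _ _ _ _ a b c (hget [(((((((0) + a) % pvM + b) % pvM + b) % pvM + c) % pvM)), (((((0)) + a) % pvM + b) % pvM), (((((0))) + a) % pvM + b) % pvM, (((0)))]) (hgetp [(((((((0) + a) % pvM + b) % pvM + b) % pvM + c) % pvM)), (((((0)) + a) % pvM + b) % pvM), (((((0))) + a) % pvM + b) % pvM, (((0)))])]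
  rw [List.set_set]
  rw [List.foldl_nil]
  rfl

lemma tri_spec (k : Nat) :
    tri k = ((fE k * fE k) % pvM, (fE k * fO k) % pvM, (fO k * fO k) % pvM) := by
  induction k with
  | zero => simp [tri, fE, fO, pvM]
  | succ k ih =>
    have hE : fE (k + 1) = fE k + fO k := by
      simp only [fE, fO]
      rw [show (k + 1) + 2 = (k + 2) + 1 from rfl]
      rw [show (k + 2) + 1 = (k) + 2 + 1 from rfl]
      rw [Nat.fib_add_two (n := k + 1)]
      push_cast
      ring
    have hO : fO (k + 1) = fE k := rfl
    show triStep (tri k) = _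
    rw [ih]
    unfold triStep
    simp only
    refine Prod.ext ?_ (Prod.ext ?_ ?_)
    · show ((((0 + fE k * fE k % pvM) % pvM + fE k * fO k % pvM) % pvM + fE k * fO k % pvM) % pvM +
          fO k * fO k % pvM) % pvM = fE (k + 1) * fE (k + 1) % pvM
      have h1 : (((((0 + fE k * fE k % pvM) % pvM + fE k * fO k % pvM) % pvM + fE k * fO k % pvM) % pvM +
          fO k * fO k % pvM)) ≡ fE k * fE k + fE k * fO k + fE k * fO k + fO k * fO k [ZMOD pvM] := by
      -- chain of self_mod collapses
        refine Int.ModEq.add ?_ (self_mod _)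
        refine (self_mod _).trans ?_
        refine Int.ModEq.add ?_ (self_mod _)
        refine (self_mod _).trans ?_
        refine Int.ModEq.add ?_ (self_mod _)
        refine (self_mod _).trans ?_
        simpa using (Int.ModEq.refl 0).add (self_mod (fE k * fE k))
      calc (((((0 + fE k * fE k % pvM) % pvM + fE k * fO k % pvM) % pvM + fE k * fO k % pvM) % pvM +
          fO k * fO k % pvM)) % pvM
          = (fE k * fE k + fE k * fO k + fE k * fO k + fO k * fO k) % pvM := h1
        _ = fE (k + 1) * fE (k + 1) % pvM := by rw [hE]; ring_nf
    · show ((0 + fE k * fE k % pvM) % pvM + fE k * fO k % pvM) % pvM = fE (k + 1) * fO (k + 1) % pvM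
      have h1 : ((0 + fE k * fE k % pvM) % pvM + fE k * fO k % pvM)
          ≡ fE k * fE k + fE k * fO k [ZMOD pvM] := by
        refine Int.ModEq.add ?_ (self_mod _)
        refine (self_mod _).trans ?_
        simpa using (Int.ModEq.refl 0).add (self_mod (fE k * fE k))
      calc ((0 + fE k * fE k % pvM) % pvM + fE k * fO k % pvM) % pvM
          = (fE k * fE k + fE k * fO k) % pvM := h1
        _ = fE (k + 1) * fO (k + 1) % pvM := by rw [hE, hO]; ring_nf
    · show (0 + fE k * fE k % pvM) % pvM = fO (k + 1) * fO (k + 1) % pvM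
      have h1 : (0 + fE k * fE k % pvM) ≡ fE k * fE k [ZMOD pvM] := by
        simpa using (Int.ModEq.refl 0).add (self_mod (fE k * fE k))
      calc (0 + fE k * fE k % pvM) % pvM = (fE k * fE k) % pvM := h1
        _ = fO (k + 1) * fO (k + 1) % pvM := by rw [hO]
lemma init_eq (n : Nat) (hn : 1 ≤ n) :
    (PySem.List.pyRange 0 4 1).foldl (fun dp state => pySet2 dp 0 state 1)
      ((PySem.List.pyRange 0 (n : Int) 1).map (fun _ => List.replicate 4 (0 : Int)))
    = dpModel n 0 := by
  rw [pyRange4, PySem.List.pyRange_zero_nat, List.map_map]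
  rw [show (fun _ => List.replicate 4 (0 : Int)) ∘ (fun k : Nat => (k : Int))
      = (fun _ : Nat => [0, 0, 0, 0]) from rfl]
  set f : Nat → List Int := fun _ : Nat => [0, 0, 0, 0] with hf
  have hlen : ((List.range n).map f).length = n := by simp
  have hget0 : ∀ (l : List (List Int)) (r : List Int), l.length = n →
      PySem.List.pyGetD (l.set 0 r) (0 : Int) [] = r := by
    intro l r hl
    rw [PySem.List.pyGetD_zero, getD_set_self _ _ (by omega)]
  have hrow0 : PySem.List.pyGetD ((List.range n).map f) (0 : Int) [] = [0, 0, 0, 0] := by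
    rw [PySem.List.pyGetD_zero, PySem.List.getD_map_range _ _ _ _ (by omega)]
  have hset0 : ∀ (l : List (List Int)) (r : List Int), PySem.List.pySetD l (0 : Int) r = l.set 0 r := by
    intro l r
    rw [PySem.List.pySetD_of_nonneg _ _ (by norm_num)]
    rfl
  rw [List.foldl_cons]
  rw [show pySet2 ((List.range n).map f) 0 0 1 = ((List.range n).map f).set 0 [1, 0, 0, 0] by
    simp only [pySet2, hrow0, hset0, setD_lit0]]
  rw [List.foldl_cons]
  rw [show pySet2 (((List.range n).map f).set 0 [1, 0, 0, 0]) 0 1 1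
      = ((List.range n).map f).set 0 [1, 1, 0, 0] by
    simp only [pySet2, hget0 _ _ hlen, hset0, setD_lit1, List.set_set]]
  rw [List.foldl_cons]
  rw [show pySet2 (((List.range n).map f).set 0 [1, 1, 0, 0]) 0 2 1
      = ((List.range n).map f).set 0 [1, 1, 1, 0] by
    simp only [pySet2, hget0 _ _ hlen, hset0, setD_lit2, List.set_set]]
  rw [List.foldl_cons]
  rw [show pySet2 (((List.range n).map f).set 0 [1, 1, 1, 0]) 0 3 1
      = ((List.range n).map f).set 0 [1, 1, 1, 1] by
    simp only [pySet2, hget0 _ _ hlen, hset0, setD_lit3, List.set_set]]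
  rw [List.foldl_nil]
  rw [set_map_range n 0 f _ (by omega)]
  unfold dpModel
  apply List.map_congr_left
  intro i _
  by_cases hi : i = 0
  · subst hi; simp [rowOf, tri]
  · rw [if_neg hi, if_neg (by omega)]
lemma dpModel_len (n k : Nat) : (dpModel n k).length = n := by simp [dpModel]
lemma dpModel_row (n k i : Nat) (hi : i < n) :
    PySem.List.pyGetD (dpModel n k) (i : Int) []
      = if i ≤ k then rowOf (tri i) else [0, 0, 0, 0] := by
  rw [PySem.List.pyGetD_natCast]
  unfold dpModel
  rw [PySem.List.getD_map_range _ _ _ _ hi]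
lemma outer_eq (n : Nat) (hn : 1 ≤ n) (m : Nat) (hm : m ≤ n - 1) :
    (List.range m).foldl (fun dp (k : Nat) => aInner dp (1 + (k : Int))) (dpModel n 0) = dpModel n m := by
  induction m with
  | zero => simp
  | succ m ih =>
    rw [List.range_succ, List.foldl_append, ih (by omega), List.foldl_cons, List.foldl_nil]
    have hcast : 1 + (m : Int) = ((m + 1 : Nat) : Int) := by push_cast; ring
    rw [hcast]
    have hrow : PySem.List.pyGetD (dpModel n m) ((m + 1 : Nat) : Int) [] = [0, 0, 0, 0] := by
      rw [dpModel_row n m (m + 1) (by omega), if_neg (by omega)]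
    have hprev : PySem.List.pyGetD (dpModel n m) (((m + 1 : Nat) : Int) - 1) []
        = [(tri m).1, (tri m).2.1, (tri m).2.1, (tri m).2.2] := by
      have h1 : ((m + 1 : Nat) : Int) - 1 = ((m : Nat) : Int) := by push_cast; ring
      rw [h1, dpModel_row n m m (by omega), if_pos (by omega)]
      rfl
    rw [aInner_spec (dpModel n m) (m + 1) (by rw [dpModel_len]; omega) (by omega)
        (tri m).1 (tri m).2.1 (tri m).2.2 hrow hprev]
    have htri : triStep ((tri m).1, (tri m).2.1, (tri m).2.2) = tri (m + 1) := by
      show triStep (tri m) = tri (m + 1)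
      rfl
    rw [htri]
    unfold dpModel
    rw [set_map_range n (m + 1) _ _ (by omega)]
    apply List.map_congr_left
    intro i _
    by_cases hi : i = m + 1
    · rw [if_pos hi, if_pos (by omega), hi]
    · rw [if_neg hi]
      by_cases hile : i ≤ m
      · rw [if_pos hile, if_pos (by omega)]
      · rw [if_neg hile, if_neg (by omega)]

lemma final_eq (nt : Nat) (hn1 : 1 ≤ nt) :
    countHousePlacements (nt : Int) = countHousePlacements_alt (nt : Int) := by
  -- A side
  unfold countHousePlacements
  simp only
  rw [init_eq nt hn1]
  rw [PySem.List.pyRange_one 1 (nt : Int), List.foldl_map]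
  rw [show (((nt : Int)) - 1).toNat = nt - 1 by omega]
  rw [outer_eq nt hn1 (nt - 1) le_rfl]
  rw [show ((nt : Int)) - 1 = ((nt - 1 : Nat) : Int) by omega]
  rw [dpModel_row nt (nt - 1) (nt - 1) (by omega), if_pos le_rfl]
  rw [tri_spec (nt - 1)]
  -- B side
  unfold countHousePlacements_alt
  simp only
  rw [show ((nt : Int) + 2).toNat = nt + 2 by omega]
  rw [fibFD_eq (nt + 2)]
  simp only [rowOf, List.foldl, pmod]
  set x := fE (nt - 1) with hx
  set y := fO (nt - 1) with hy
  have hsum : x + y = (Nat.fib (nt + 2) : Int) := by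
    rw [hx, hy]
    unfold fE fO
    rw [show nt - 1 + 2 = nt + 1 by omega, show nt - 1 + 1 = nt by omega,
        show nt + 2 = nt + 1 + 1 from rfl, Nat.fib_add_two]
    push_cast
    ring
  have hL : ((((0 + x * x % pvM) + x * y % pvM) + x * y % pvM) + y * y % pvM) % pvM
      = ((0 + x * x + x * y + x * y + y * y)) % pvM :=
    (((((Int.ModEq.refl 0).add (self_mod _)).add (self_mod _)).add (self_mod _)).add (self_mod _))
  have hR : ((Nat.fib (nt + 2) : Int) % pvM * ((Nat.fib (nt + 2) : Int) % pvM)) % pvM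
      = ((Nat.fib (nt + 2) : Int) * (Nat.fib (nt + 2) : Int)) % pvM :=
    (self_mod _).mul (self_mod _)
  rw [hL, hR, ← hsum]
  congr 1
  ring

-- ===== VERDICT (by name: the statement is the Claim_ definition above) =====
theorem countHousePlacements_spec : Claim_equal_countHousePlacements := by
  intro n _ hpre
  unfold Pre_countHousePlacements at hpre
  unfold Spec_countHousePlacements
  have hcast : ((n.toNat : Nat) : Int) = n := Int.toNat_of_nonneg (by omega)
  rw [← hcast]
  exact final_eq n.toNat (by omega)
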